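-- pv_equiv track=rewrite | github.com/SemiGnu/advent-of-sharp | 17/17.py | get_x_steps
-- ===== SOURCE A (Python) =====
-- x_range = range(143,178)
--
-- def get_x_steps(velocity):
--     steps = []
--     pos = 0
--     step = 0
--     while pos <= x_range[-1] and velocity > 1:
--         step += 1
--         pos += velocity
--         velocity -= 1
--         if x_range[0] <= pos <= x_range[-1]:
--             steps.append(step)
--     return steps
-- ===== SOURCE B (Python) =====
-- x_range = range(143,178)
--
-- def get_x_steps(velocity):
--     steps = []
--     for i in range(1, velocity):
--         pos = i * velocity - i * (i - 1) // 2
--         if pos > x_range[-1]: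
--             break
--         if pos >= x_range[0]:
--             steps.append(i)
--     return steps
-- ===== Notes on version B (the rewrite author's own statement) =====
-- stated objective: alternative
-- what changed: B replaces the mutable pos/velocity accumulation loop with a single index loop computing each landing position in closed form (pos = i*v - i*(i-1)//2) and breaking once it overshoots the target.
import Mathlib
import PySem

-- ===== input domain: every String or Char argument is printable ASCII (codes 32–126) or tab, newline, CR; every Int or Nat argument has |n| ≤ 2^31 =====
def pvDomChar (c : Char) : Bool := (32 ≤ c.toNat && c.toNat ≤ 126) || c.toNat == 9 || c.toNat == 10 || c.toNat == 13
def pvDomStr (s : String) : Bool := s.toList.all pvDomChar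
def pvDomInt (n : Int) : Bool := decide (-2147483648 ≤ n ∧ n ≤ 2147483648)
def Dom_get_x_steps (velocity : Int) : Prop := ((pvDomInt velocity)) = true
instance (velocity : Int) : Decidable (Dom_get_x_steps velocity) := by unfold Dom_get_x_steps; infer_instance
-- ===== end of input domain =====

-- B replaces the mutable pos/velocity accumulation with a loop over step indices computing
-- each landing position in closed form (alternative decomposition, same cost).

-- ===== PORT A =====
-- x_range = range(143,178)
def x_range : List Int := PySem.List.pyRange 143 178 1
-- x_range[-1] / x_range[0]; x_range is a nonempty literal so Python's indexing never raises (getD default unreachable)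
def x_max : Int := (PySem.List.pyGet? x_range (-1)).getD 0
def x_min : Int := (PySem.List.pyGet? x_range 0).getD 0

-- the while loop: state (pos, step, velocity, steps), one recursive call per iteration
def get_x_steps_loop (pos step velocity : Int) (steps : List Int) : List Int :=
  if h : pos ≤ x_max ∧ velocity > 1 then
    get_x_steps_loop (pos + velocity) (step + 1) (velocity - 1)
      (if x_min ≤ pos + velocity ∧ pos + velocity ≤ x_max then steps ++ [step + 1] else steps)
  else steps
termination_by velocity.toNat
decreasing_by omega

def get_x_steps (velocity : Int) : List Int := get_x_steps_loop 0 0 velocity []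

-- ===== PORT B =====
-- for i in range(1, velocity) with an early break once pos overshoots x_range[-1]
def get_x_steps_alt_loop (velocity i : Int) (steps : List Int) : List Int :=
  if h : i < velocity then
    if i * velocity - PySem.Int.floordiv (i * (i - 1)) 2 > x_max then steps
    else get_x_steps_alt_loop velocity (i + 1)
      (if x_min ≤ i * velocity - PySem.Int.floordiv (i * (i - 1)) 2 then steps ++ [i] else steps)
  else steps
termination_by (velocity - i).toNat
decreasing_by omega

def get_x_steps_alt (velocity : Int) : List Int := get_x_steps_alt_loop velocity 1 []

-- ===== PRECONDITION & SPEC =====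
def Spec_get_x_steps (velocity : Int) (out : List Int) : Prop := out = get_x_steps_alt velocity
instance (velocity : Int) (out : List Int) : Decidable (Spec_get_x_steps velocity out) := by unfold Spec_get_x_steps; infer_instance

-- ===== CLAIM (what is proved, stated in full; the proofs are below) =====
def Claim_equal_get_x_steps : Prop := ∀ (velocity : Int), Dom_get_x_steps velocity → Spec_get_x_steps velocity (get_x_steps velocity)

-- ===== LEMMAS AND PROOFS =====

-- positions telescope: the closed form at i equals the closed form at i-1 plus the velocity (v - i + 1)
theorem pos_closed (v i : Int) :
    i * v - PySem.Int.floordiv (i * (i - 1)) 2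
      = (i - 1) * v - PySem.Int.floordiv ((i - 1) * (i - 2)) 2 + (v - i + 1) := by
  obtain ⟨k, hk⟩ := Int.even_mul_succ_self (i - 1)
  obtain ⟨m, hm⟩ := Int.even_mul_succ_self (i - 2)
  have hk' : i * (i - 1) = 2 * k := by linear_combination hk
  have hm' : (i - 1) * (i - 2) = 2 * m := by linear_combination hm
  rw [PySem.Int.floordiv_eq_ediv_of_pos (by norm_num), PySem.Int.floordiv_eq_ediv_of_pos (by norm_num),
      hk', hm', Int.mul_ediv_cancel_left _ (by norm_num), Int.mul_ediv_cancel_left _ (by norm_num)]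
  have hv : i * v = (i - 1) * v + v := by ring
  have hkm : 2 * k - 2 * m = 2 * (i - 1) := by linear_combination hm' - hk'
  omega

-- invariant: A's loop at the top of iteration i (step = i-1, pos = closed form of i-1 steps,
-- remaining velocity = v - i + 1) agrees with B's loop at index i
theorem loop_agree (n : Nat) : ∀ (v i : Int) (steps : List Int), 1 ≤ i → (v - i).toNat ≤ n →
    get_x_steps_loop ((i - 1) * v - PySem.Int.floordiv ((i - 1) * (i - 2)) 2) (i - 1) (v - i + 1) steps
      = get_x_steps_alt_loop v i steps := by
  induction n with
  | zero =>
    intro v i steps hi hn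
    rw [get_x_steps_loop.eq_def, get_x_steps_alt_loop.eq_def,
        dif_neg (fun hc => absurd hc.2 (by omega)), dif_neg (by omega)]
  | succ n ih =>
    intro v i steps hi hn
    rw [get_x_steps_loop.eq_def, get_x_steps_alt_loop.eq_def]
    by_cases hlt : i < v
    · have hstep : (i - 1) * v - PySem.Int.floordiv ((i - 1) * (i - 2)) 2 + (v - i + 1)
          = i * v - PySem.Int.floordiv (i * (i - 1)) 2 := (pos_closed v i).symm
      by_cases hpre : (i - 1) * v - PySem.Int.floordiv ((i - 1) * (i - 2)) 2 ≤ x_max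
      · rw [dif_pos ⟨hpre, by omega⟩, dif_pos hlt, hstep]
        by_cases hover : i * v - PySem.Int.floordiv (i * (i - 1)) 2 > x_max
        · rw [if_pos hover, if_neg (fun hc => absurd hc.2 (not_le.mpr hover)),
              get_x_steps_loop.eq_def, dif_neg (fun hc => absurd hc.1 (not_le.mpr hover))]
        · rw [if_neg hover]
          have h1 : (i - 1 + 1 : Int) = i := by ring
          have hif : (if x_min ≤ i * v - PySem.Int.floordiv (i * (i - 1)) 2
                          ∧ i * v - PySem.Int.floordiv (i * (i - 1)) 2 ≤ x_max
                      then steps ++ [i - 1 + 1] else steps)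
              = (if x_min ≤ i * v - PySem.Int.floordiv (i * (i - 1)) 2
                 then steps ++ [i] else steps) := by
            rw [h1]
            by_cases hc : x_min ≤ i * v - PySem.Int.floordiv (i * (i - 1)) 2
            · rw [if_pos ⟨hc, not_lt.mp hover⟩, if_pos hc]
            · rw [if_neg (fun hh => hc hh.1), if_neg hc]
          rw [hif, h1]
          have h2 : (v - i + 1 - 1 : Int) = v - (i + 1) + 1 := by ring
          rw [h2]
          have key := ih v (i + 1)
            (if x_min ≤ i * v - PySem.Int.floordiv (i * (i - 1)) 2 then steps ++ [i] else steps)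
            (by omega) (by omega)
          have e1 : (i + 1 - 1 : Int) = i := by ring
          have e2 : (i + 1 - 2 : Int) = i - 1 := by ring
          rw [e1, e2] at key
          exact key
      · rw [dif_neg (fun hc => hpre hc.1), dif_pos hlt, if_pos (by omega)]
    · rw [dif_neg (fun hc => absurd hc.2 (by omega)), dif_neg hlt]

-- ===== VERDICT (by name: the statement is the Claim_ definition above) =====
theorem get_x_steps_spec : Claim_equal_get_x_steps := by
  intro v _
  unfold Spec_get_x_steps get_x_steps get_x_steps_alt
  have key := loop_agree (v - 1).toNat v 1 [] (le_refl 1) (le_refl _)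
  have e0 : ((1 : Int) - 1) * v - PySem.Int.floordiv (((1 : Int) - 1) * ((1 : Int) - 2)) 2 = 0 := by
    rw [PySem.Int.floordiv_eq_ediv_of_pos (by norm_num)]; norm_num
  have e1 : ((1 : Int) - 1) = 0 := by norm_num
  have e2 : (v - 1 + 1 : Int) = v := by ring
  rw [e0, e1, e2] at key
  exact key
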